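-- pv_equiv track=rewrite | github.com/renvvvvv/dco-skillhub | backend/app/report_builder.py | _sum_metrics
-- ===== SOURCE A (Python) =====
-- def _sum_metrics(metrics: list) -> dict:
--     """汇总指标"""
--     total = {
--         "skills_total": 0,
--         "downloads": 0,
--         "views": 0,
--         "publishes": 0,
--         "searches": 0,
--         "unique_users": 0,
--     }
--     for m in metrics:
--         total["skills_total"] += m.get("skills", {}).get("total_publishes", 0)
--         total["downloads"] += m.get("skills", {}).get("total_downloads", 0)
--         total["views"] += m.get("skills", {}).get("total_views", 0)
--         total["publishes"] += m.get("skills", {}).get("total_publishes", 0)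
--         total["searches"] += m.get("searches", {}).get("total", 0)
--         total["unique_users"] = max(
--             total["unique_users"], m.get("summary", {}).get("unique_users", 0)
--         )
--     return total
-- ===== SOURCE B (Python) =====
-- def _sum_metrics(metrics: list) -> dict:
--     """汇总指标 — independent reductions instead of one fused accumulating loop."""
--     publishes = sum(m.get("skills", {}).get("total_publishes", 0) for m in metrics)
--     downloads = sum(m.get("skills", {}).get("total_downloads", 0) for m in metrics)
--     views = sum(m.get("skills", {}).get("total_views", 0) for m in metrics)
--     searches = sum(m.get("searches", {}).get("total", 0) for m in metrics)
--     unique_users = max([0] + [m.get("summary", {}).get("unique_users", 0) for m in metrics])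
--     return {
--         "skills_total": publishes,
--         "downloads": downloads,
--         "views": views,
--         "publishes": publishes,
--         "searches": searches,
--         "unique_users": unique_users,
--     }
-- ===== Notes on version B (the rewrite author's own statement) =====
-- stated objective: simpler
-- what changed: Replaces the single fused accumulating loop over a mutable dict with six independent reductions (four sums, one max over [0]+values) and assembles the result dict directly from those values.
import Mathlib
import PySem

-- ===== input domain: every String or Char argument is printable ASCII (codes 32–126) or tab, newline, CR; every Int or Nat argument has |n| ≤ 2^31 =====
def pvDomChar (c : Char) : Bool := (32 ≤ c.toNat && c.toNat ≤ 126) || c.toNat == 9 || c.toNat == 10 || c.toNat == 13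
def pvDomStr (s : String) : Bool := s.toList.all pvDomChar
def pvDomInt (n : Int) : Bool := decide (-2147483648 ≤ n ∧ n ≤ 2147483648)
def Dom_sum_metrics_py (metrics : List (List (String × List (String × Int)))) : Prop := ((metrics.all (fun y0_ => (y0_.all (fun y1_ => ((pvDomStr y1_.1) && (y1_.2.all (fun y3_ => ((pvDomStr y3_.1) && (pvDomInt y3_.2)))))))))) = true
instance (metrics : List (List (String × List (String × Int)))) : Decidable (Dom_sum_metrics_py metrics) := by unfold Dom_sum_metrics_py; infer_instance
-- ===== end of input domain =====

-- B replaces A's single fused accumulating loop over a mutable dict by six independent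
-- reductions (four sums, one max over 0-prefixed values); objective: simpler decomposition.

-- ===== PORT A =====
-- m.get(outer, {}).get(key, 0)
def pvGetA (m : List (String × List (String × Int))) (outer key : String) : Int :=
  PySem.Dict.getD ⟨PySem.Dict.getD ⟨m⟩ outer []⟩ key 0

-- one iteration of A's for-loop over the mutable dict 'total'
def sumStepA (t : PySem.Dict String Int) (m : List (String × List (String × Int))) :
    PySem.Dict String Int :=
  let t := t.insert "skills_total" (t.getD "skills_total" 0 + pvGetA m "skills" "total_publishes")
  let t := t.insert "downloads" (t.getD "downloads" 0 + pvGetA m "skills" "total_downloads")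
  let t := t.insert "views" (t.getD "views" 0 + pvGetA m "skills" "total_views")
  let t := t.insert "publishes" (t.getD "publishes" 0 + pvGetA m "skills" "total_publishes")
  let t := t.insert "searches" (t.getD "searches" 0 + pvGetA m "searches" "total")
  t.insert "unique_users" (max (t.getD "unique_users" 0) (pvGetA m "summary" "unique_users"))

def sum_metrics_py (metrics : List (List (String × List (String × Int)))) : List (String × Int) :=
  (metrics.foldl sumStepA
    ⟨[("skills_total", 0), ("downloads", 0), ("views", 0),
      ("publishes", 0), ("searches", 0), ("unique_users", 0)]⟩).items

-- ===== PORT B =====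
-- m.get(outer, {}).get(key, 0)
def pvGetB (m : List (String × List (String × Int))) (outer key : String) : Int :=
  PySem.Dict.getD ⟨PySem.Dict.getD ⟨m⟩ outer []⟩ key 0

def sum_metrics_py_alt (metrics : List (List (String × List (String × Int)))) :
    List (String × Int) :=
  let publishes := (metrics.map (fun m => pvGetB m "skills" "total_publishes")).sum
  let downloads := (metrics.map (fun m => pvGetB m "skills" "total_downloads")).sum
  let views := (metrics.map (fun m => pvGetB m "skills" "total_views")).sum
  let searches := (metrics.map (fun m => pvGetB m "searches" "total")).sum
  -- max([0] + [...]): the list is nonempty, so maxD's default is never used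
  let uniqueUsers := PySem.List.maxD
    ((0 : Int) :: metrics.map (fun m => pvGetB m "summary" "unique_users")) id 0
  [("skills_total", publishes), ("downloads", downloads), ("views", views),
   ("publishes", publishes), ("searches", searches), ("unique_users", uniqueUsers)]

-- ===== PRECONDITION & SPEC =====
def Spec_sum_metrics_py (metrics : List (List (String × List (String × Int)))) (out : List (String × Int)) : Prop := out = sum_metrics_py_alt metrics
instance (metrics : List (List (String × List (String × Int)))) (out : List (String × Int)) : Decidable (Spec_sum_metrics_py metrics out) := by unfold Spec_sum_metrics_py; infer_instance

-- ===== CLAIM (what is proved, stated in full; the proofs are below) =====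
def Claim_equal_sum_metrics_py : Prop := ∀ (metrics : List (List (String × List (String × Int)))), Dom_sum_metrics_py metrics → Spec_sum_metrics_py metrics (sum_metrics_py metrics)

-- ===== LEMMAS AND PROOFS =====

-- loop invariant for A's fold: the six slots track the independent reductions
theorem sumStepA_foldl_items (ms : List (List (String × List (String × Int))))
    (a b c d e f : Int) :
    (ms.foldl sumStepA
      ⟨[("skills_total", a), ("downloads", b), ("views", c),
        ("publishes", d), ("searches", e), ("unique_users", f)]⟩).items
    = [("skills_total", a + (ms.map (fun m => pvGetA m "skills" "total_publishes")).sum),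
       ("downloads", b + (ms.map (fun m => pvGetA m "skills" "total_downloads")).sum),
       ("views", c + (ms.map (fun m => pvGetA m "skills" "total_views")).sum),
       ("publishes", d + (ms.map (fun m => pvGetA m "skills" "total_publishes")).sum),
       ("searches", e + (ms.map (fun m => pvGetA m "searches" "total")).sum),
       ("unique_users", (ms.map (fun m => pvGetA m "summary" "unique_users")).foldl max f)] := by
  induction ms generalizing a b c d e f with
  | nil => simp
  | cons m ms ih =>
    simp only [List.foldl_cons]
    have hstep : sumStepA
        ⟨[("skills_total", a), ("downloads", b), ("views", c),
          ("publishes", d), ("searches", e), ("unique_users", f)]⟩ m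
      = ⟨[("skills_total", a + pvGetA m "skills" "total_publishes"),
          ("downloads", b + pvGetA m "skills" "total_downloads"),
          ("views", c + pvGetA m "skills" "total_views"),
          ("publishes", d + pvGetA m "skills" "total_publishes"),
          ("searches", e + pvGetA m "searches" "total"),
          ("unique_users", max f (pvGetA m "summary" "unique_users"))]⟩ := by
      simp [sumStepA, PySem.Dict.insert, PySem.Dict.getD, PySem.Dict.get?,
        PySem.Dict.contains, List.find?]
    rw [hstep, ih]
    simp [add_assoc]

-- PySem.List.maxD over a 0-headed list is the plain foldl max from 0
theorem maxD_cons_zero (xs : List Int) :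
    PySem.List.maxD ((0 : Int) :: xs) id 0 = xs.foldl max 0 := by
  suffices h : ∀ (u : Int), PySem.List.maxD (u :: xs) id 0 = xs.foldl max u by exact h 0
  induction xs with
  | nil => intro u; simp [PySem.List.maxD, PySem.List.max?]
  | cons x xs ih =>
    intro u
    have hstep : PySem.List.maxD (u :: x :: xs) id 0 = PySem.List.maxD (max u x :: xs) id 0 := by
      simp only [PySem.List.maxD, PySem.List.max?, List.foldl_cons, id]
      congr 1
      by_cases h : u < x
      · simp [h, max_eq_right h.le]
      · simp [h, max_eq_left (not_lt.mp h)]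
    rw [hstep, ih, List.foldl_cons]

-- ===== VERDICT (by name: the statement is the Claim_ definition above) =====
theorem sum_metrics_py_spec : Claim_equal_sum_metrics_py := by
  intro metrics _
  unfold Spec_sum_metrics_py sum_metrics_py sum_metrics_py_alt
  rw [sumStepA_foldl_items, maxD_cons_zero]
  simp only [zero_add, List.foldl_map]
  rfl
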